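-- pv_equiv track=rewrite | github.com/csh3l3-20172018-ade/tebak-jenis-kelamin-berdasarkan-nama-yuwan96 | IdentifikasiGender.py | cowok
-- ===== SOURCE A (Python) =====
-- def cowok(asma):
--     y = 0
--     for i in range(len(asma)):
--         if asma[i] == 'b':
--             y += 1
--         if asma[i] == 'B':
--             y += 1
--         elif asma[i] == 'd':
--             y += 1
--         if asma[i] == 'D':
--             y += 1
--         elif asma[i] == 'o':
--             y += 1
--         elif asma[i] == 'O':
--             y += 1
--         elif asma[i] == ' ':
--             break
--     return y
-- ===== SOURCE B (Python) =====
-- def cowok(asma):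
--     prefix = asma.split(' ', 1)[0]
--     return sum(prefix.count(ch) for ch in 'bBdDoO')
-- ===== Notes on version B (the rewrite author's own statement) =====
-- stated objective: alternative
-- what changed: Instead of A's single indexed scan that fuses space-boundary detection (early break) with a chain of per-character equality tests on one accumulator, B first extracts the prefix before the first space and then makes six independent str.count passes, one per target letter, summing the six totals; the str-method passes run in C, unlike A's per-character Python loop.
import Mathlib
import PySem

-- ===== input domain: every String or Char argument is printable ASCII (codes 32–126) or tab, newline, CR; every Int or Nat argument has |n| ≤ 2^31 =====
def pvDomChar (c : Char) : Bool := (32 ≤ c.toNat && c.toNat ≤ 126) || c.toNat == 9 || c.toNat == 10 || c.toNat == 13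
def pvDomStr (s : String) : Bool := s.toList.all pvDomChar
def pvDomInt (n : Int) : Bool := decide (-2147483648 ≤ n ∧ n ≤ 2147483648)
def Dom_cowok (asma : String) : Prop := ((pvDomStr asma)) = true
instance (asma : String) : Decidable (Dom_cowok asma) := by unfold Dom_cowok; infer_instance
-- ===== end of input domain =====

-- B replaces A's fused scan (per-char equality chain + early break on space) by prefix extraction followed by six per-letter count passes; objective: alternative.

-- ===== PORT A =====
-- literal port of A's indexed loop with its accumulator y and the break on ' '
def cowokLoop : List Char → Int → Int
  | [], y => y
  | c :: rest, y =>
    let y1 := if c = 'b' then y + 1 else y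
    let y2 := if c = 'B' then y1 + 1 else if c = 'd' then y1 + 1 else y1
    if c = 'D' then cowokLoop rest (y2 + 1)
    else if c = 'o' then cowokLoop rest (y2 + 1)
    else if c = 'O' then cowokLoop rest (y2 + 1)
    else if c = ' ' then y2
    else cowokLoop rest y2

def cowok (asma : String) : Int := cowokLoop asma.toList 0

-- ===== PORT B =====
-- prefix = asma.split(' ', 1)[0]  ≡ the characters before the first space;
-- then one count pass per target letter, summed
def cowok_alt (asma : String) : Int :=
  let pref := asma.toList.takeWhile (fun c => c ≠ ' ')
  ("bBdDoO".toList.map (fun ch => (pref.count ch : Int))).sum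

-- ===== PRECONDITION & SPEC =====
def Spec_cowok (asma : String) (out : Int) : Prop := out = cowok_alt asma
instance (asma : String) (out : Int) : Decidable (Spec_cowok asma out) := by unfold Spec_cowok; infer_instance

-- ===== CLAIM =====
def Claim_equal_cowok : Prop := ∀ (asma : String), Dom_cowok asma → Spec_cowok asma (cowok asma)

-- ===== LEMMAS AND PROOFS =====
theorem cowokLoop_eq (l : List Char) : ∀ (y : Int),
    cowokLoop l y = y + (((l.takeWhile (fun c => c ≠ ' ')).filter (fun c => c ∈ "bBdDoO".toList)).length : Int) := by
  induction l with
  | nil => intro y; simp [cowokLoop]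
  | cons c rest ih =>
    intro y
    rcases eq_or_ne c 'b' with h | hb
    · subst h; simp [cowokLoop, ih]; ring
    rcases eq_or_ne c 'B' with h | hB
    · subst h; simp [cowokLoop, ih]; ring
    rcases eq_or_ne c 'd' with h | hd
    · subst h; simp [cowokLoop, ih]; ring
    rcases eq_or_ne c 'D' with h | hD
    · subst h; simp [cowokLoop, ih]; ring
    rcases eq_or_ne c 'o' with h | ho
    · subst h; simp [cowokLoop, ih]; ring
    rcases eq_or_ne c 'O' with h | hO
    · subst h; simp [cowokLoop, ih]; ring
    rcases eq_or_ne c ' ' with h | hs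
    · subst h; simp [cowokLoop]
    · simp [cowokLoop, ih, hb, hB, hd, hD, ho, hO, hs]

-- length of the membership-filter equals the sum of per-letter counts, for a duplicate-free letter list
theorem sum_ite_eq_count (c : Char) (cs : List Char) :
    (cs.map (fun i => if i = c then 1 else 0)).sum = cs.count c := by
  induction cs with
  | nil => simp
  | cons a cs ih =>
    rcases eq_or_ne a c with rfl | h
    · simp [ih, Nat.add_comm]
    · simp [ih, h]

theorem filter_mem_length_eq_sum_counts (cs : List Char) (hnd : cs.Nodup) (l : List Char) :
    (l.filter (fun c => c ∈ cs)).length = (cs.map (fun ch => l.count ch)).sum := by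
  induction l with
  | nil => simp
  | cons c l ih =>
    have hmap : cs.map (fun ch => (c :: l).count ch)
        = cs.map (fun ch => l.count ch + if ch = c then 1 else 0) := by
      apply List.map_congr_left; intro ch _
      rcases eq_or_ne ch c with rfl | h
      · simp
      · simp [h, Ne.symm h, List.count_cons_of_ne]
    have hcount : cs.count c = if c ∈ cs then 1 else 0 := by
      split_ifs with h
      · exact List.count_eq_one_of_mem hnd h
      · exact List.count_eq_zero.mpr h
    by_cases h : c ∈ cs <;>
      simp [h, hmap, List.sum_map_add, ih, sum_ite_eq_count, hcount, Nat.add_comm]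

-- ===== VERDICT =====
theorem cowok_spec : Claim_equal_cowok := by
  intro asma _
  unfold Spec_cowok cowok cowok_alt
  rw [cowokLoop_eq]
  rw [filter_mem_length_eq_sum_counts "bBdDoO".toList (by decide)]
  simp
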